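-- pv_equiv track=rewrite | github.com/eightyeighteyes/coursera_algorithms | karger.py | make_edges
-- ===== SOURCE A (Python) =====
-- def make_edges(nodes):
--     edges = []
--     for node in nodes:
--         for path in nodes[node]:
--             edge = [node, path]
--             edges.append((edge[0], edge[1]))
--
--     edges.sort()
--
--     return edges
-- ===== SOURCE B (Python) =====
-- def make_edges(nodes):
--     return [(n, p)
--             for n, adj in sorted(nodes.items(), key=lambda kv: kv[0])
--             for p in sorted(adj)]
-- ===== Notes on version B (the rewrite author's own statement) =====
-- stated objective: alternative
-- what changed: Instead of a nested append loop collecting every (node, path) tuple and then sorting the whole edge list with tuple comparisons, B is a single flat comprehension over the dict items sorted by key with each adjacency list sorted on its own, so the output comes out already in lexicographic order with no final sort of tuples (dict keys are unique, so the order is identical).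
import Mathlib
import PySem

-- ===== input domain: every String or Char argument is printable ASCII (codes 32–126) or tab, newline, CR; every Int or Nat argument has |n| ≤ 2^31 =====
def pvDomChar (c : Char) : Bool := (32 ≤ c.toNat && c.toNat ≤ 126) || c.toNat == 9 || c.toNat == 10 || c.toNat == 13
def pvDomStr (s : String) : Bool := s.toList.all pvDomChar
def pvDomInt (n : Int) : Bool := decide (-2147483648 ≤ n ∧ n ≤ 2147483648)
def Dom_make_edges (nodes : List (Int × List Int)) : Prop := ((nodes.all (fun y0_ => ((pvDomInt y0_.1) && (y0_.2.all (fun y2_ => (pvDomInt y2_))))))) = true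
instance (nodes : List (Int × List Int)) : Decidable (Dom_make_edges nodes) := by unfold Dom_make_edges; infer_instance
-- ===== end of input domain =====

-- B replaces "append every (node, path) tuple in a nested loop, then sort the whole
-- edge list" by one flat comprehension over the items sorted by key with each
-- adjacency list sorted, so no final sort is needed (objective: alternative).

-- ===== PORT A =====
-- edges = []; for node in nodes: for path in nodes[node]: edge = [node, path];
-- edges.append((edge[0], edge[1])); edges.sort(); return edges.
-- 'nodes[node]' is a dict lookup of an iterated key, so it always succeeds; the
-- default [] of getD is unreachable.  'edge = [node, path]; (edge[0], edge[1])' is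
-- just the tuple (node, path).  '.sort()' on int pairs is Python's lexicographic
-- tuple sort = PySem.List.sorted2 with keys fst, snd.
def make_edges (nodes : List (Int × List Int)) : List (Int × Int) :=
  let edges := nodes.foldl (fun edges e =>
    ((PySem.Dict.mk nodes).getD e.1 []).foldl
      (fun edges path => edges ++ [(e.1, path)]) edges) []
  PySem.List.sorted2 edges Prod.fst Prod.snd

-- ===== PORT B =====
-- return [(n, p) for n, adj in sorted(nodes.items(), key=lambda kv: kv[0])
--                for p in sorted(adj)]
-- A comprehension with two for-clauses is a flatMap of a map.
def make_edges_alt (nodes : List (Int × List Int)) : List (Int × Int) :=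
  (PySem.List.sorted nodes (fun kv => kv.1)).flatMap
    (fun kv => (PySem.List.sorted kv.2 (fun p => p)).map (fun p => (kv.1, p)))

-- ===== PRECONDITION & SPEC =====
-- The argument is a Python dict, so its keys are necessarily distinct; Pre_ only
-- excludes association lists with duplicate keys, which represent no dict at all
-- (there the first-match lookup order of either port is arbitrary).
def Pre_make_edges (nodes : List (Int × List Int)) : Prop := (nodes.map Prod.fst).Nodup
instance (nodes : List (Int × List Int)) : Decidable (Pre_make_edges nodes) := by
  unfold Pre_make_edges; infer_instance

def pvWitness_make_edges : (List (Int × List Int)) := [(2, [5, 1, 5]), (0, [3]), (-1, [])]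

def Spec_make_edges (nodes : List (Int × List Int)) (out : List (Int × Int)) : Prop := out = make_edges_alt nodes
instance (nodes : List (Int × List Int)) (out : List (Int × Int)) : Decidable (Spec_make_edges nodes out) := by unfold Spec_make_edges; infer_instance

-- ===== CLAIM (what is proved, stated in full; the proofs are below) =====
def Claim_equal_make_edges : Prop := ∀ (nodes : List (Int × List Int)), Dom_make_edges nodes → Pre_make_edges nodes → Spec_make_edges nodes (make_edges nodes)

-- ===== LEMMAS AND PROOFS =====

-- Python's strict tuple comparison, as sorted2 uses it.
def pvLtb (a b : Int × Int) : Bool :=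
  decide (a.1 < b.1) || (!decide (b.1 < a.1) && decide (a.2 < b.2))

-- lexicographic ≤ on pairs
def pvLexLe (a b : Int × Int) : Prop := a.1 < b.1 ∨ (a.1 = b.1 ∧ a.2 ≤ b.2)

theorem pvLtb_false_iff (a b : Int × Int) : pvLtb a b = false ↔ pvLexLe b a := by
  simp only [pvLtb, pvLexLe, Bool.or_eq_false_iff, Bool.and_eq_false_iff,
    Bool.not_eq_false', decide_eq_false_iff_not, decide_eq_true_eq]
  omega

theorem pvLtb_true_iff (a b : Int × Int) :
    pvLtb a b = true ↔ (a.1 < b.1 ∨ (a.1 = b.1 ∧ a.2 < b.2)) := by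
  simp only [pvLtb, Bool.or_eq_true, Bool.and_eq_true, Bool.not_eq_eq_eq_not,
    Bool.not_true, decide_eq_false_iff_not, decide_eq_true_eq]
  omega

theorem pv_insertBy_pairwise (x : Int × Int) (acc : List (Int × Int))
    (h : acc.Pairwise (fun a b => pvLtb b a = false)) :
    (PySem.List.insertBy pvLtb x acc).Pairwise (fun a b => pvLtb b a = false) := by
  induction acc with
  | nil => simp [PySem.List.insertBy]
  | cons y ys ih =>
    rw [List.pairwise_cons] at h
    simp only [PySem.List.insertBy]
    by_cases hxy : pvLtb x y = true
    · simp only [hxy, if_true]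
      refine List.pairwise_cons.2 ⟨?_, List.pairwise_cons.2 h⟩
      intro z hz
      rw [pvLtb_true_iff] at hxy
      rcases List.mem_cons.1 hz with rfl | hz'
      · rw [pvLtb_false_iff]; simp only [pvLexLe]; omega
      · have hyz := h.1 z hz'
        rw [pvLtb_false_iff] at hyz ⊢
        simp only [pvLexLe] at hyz ⊢
        omega
    · rw [Bool.not_eq_true] at hxy
      simp only [hxy, Bool.false_eq_true, if_false]
      refine List.pairwise_cons.2 ⟨?_, ih h.2⟩
      intro z hz
      rcases (PySem.List.mem_insertBy pvLtb x z ys).1 hz with rfl | hz'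
      · exact hxy
      · exact h.1 z hz'

theorem pv_foldl_insertBy_pairwise (l acc : List (Int × Int))
    (h : acc.Pairwise (fun a b => pvLtb b a = false)) :
    (l.foldl (fun acc x => PySem.List.insertBy pvLtb x acc) acc).Pairwise
      (fun a b => pvLtb b a = false) := by
  induction l generalizing acc with
  | nil => exact h
  | cons x xs ih => exact ih _ (pv_insertBy_pairwise x acc h)

theorem pv_sorted2_pairwise (xs : List (Int × Int)) :
    (PySem.List.sorted2 xs Prod.fst Prod.snd).Pairwise pvLexLe := by
  have h : (PySem.List.sorted2 xs Prod.fst Prod.snd).Pairwise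
      (fun a b => pvLtb b a = false) := by
    show (xs.foldl (fun acc x => PySem.List.insertBy pvLtb x acc) []).Pairwise _
    exact pv_foldl_insertBy_pairwise xs [] List.Pairwise.nil
  exact h.imp (fun hab => (pvLtb_false_iff _ _).1 hab)

-- dict lookup of an entry's own key, under distinct keys
theorem pv_getD_mk_of_mem (nodes : List (Int × List Int)) (e : Int × List Int)
    (he : e ∈ nodes) (h : (nodes.map Prod.fst).Nodup) :
    (PySem.Dict.mk nodes).getD e.1 [] = e.2 := by
  induction nodes with
  | nil => cases he
  | cons a rest ih =>
    obtain ⟨a1, a2⟩ := a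
    simp only [List.map_cons, List.nodup_cons] at h
    rcases List.mem_cons.1 he with rfl | he'
    · simp [PySem.Dict.getD, PySem.Dict.get?_mk_cons]
    · have hne : ((a1 : Int) == e.1) = false := by
        simp only [beq_eq_false_iff_ne, ne_eq]
        intro hEq
        exact h.1 (hEq ▸ List.mem_map_of_mem he')
      have := ih he' h.2
      simpa [PySem.Dict.getD, PySem.Dict.get?_mk_cons, hne] using this

-- the unsorted edge multiset both ports produce
def pvEdges (nodes : List (Int × List Int)) : List (Int × Int) :=
  nodes.flatMap (fun e => e.2.map (fun p => (e.1, p)))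

theorem pv_edges_eq (nodes : List (Int × List Int)) (h : (nodes.map Prod.fst).Nodup) :
    nodes.foldl (fun edges e =>
        ((PySem.Dict.mk nodes).getD e.1 []).foldl
          (fun edges path => edges ++ [(e.1, path)]) edges) [] = pvEdges nodes := by
  simp only [PySem.List.foldl_append_singleton_eq_map, PySem.List.foldl_append_eq_flatMap,
    List.nil_append]
  unfold pvEdges
  rw [List.flatMap_def, List.flatMap_def]
  refine congrArg List.flatten (List.map_congr_left ?_)
  intro e he
  rw [pv_getD_mk_of_mem nodes e he h]

theorem pv_make_edges_eq (nodes : List (Int × List Int)) (h : (nodes.map Prod.fst).Nodup) :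
    make_edges nodes = PySem.List.sorted2 (pvEdges nodes) Prod.fst Prod.snd := by
  simp only [make_edges]
  rw [pv_edges_eq nodes h]

theorem pv_make_edges_alt_perm (nodes : List (Int × List Int)) :
    (make_edges_alt nodes).Perm (pvEdges nodes) := by
  unfold make_edges_alt pvEdges
  have h1 := List.Perm.flatMap_right
      (fun kv : Int × List Int =>
        (PySem.List.sorted kv.2 (fun p => p)).map (fun p => (kv.1, p)))
      (PySem.List.sorted_perm nodes (fun kv => kv.1) false)
  refine h1.trans ?_
  apply List.Perm.flatMap (List.Perm.refl nodes)
  intro e he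
  exact ((PySem.List.sorted_perm e.2 (fun p => p) false).map _)

theorem pv_make_edges_alt_pairwise (nodes : List (Int × List Int))
    (h : (nodes.map Prod.fst).Nodup) :
    (make_edges_alt nodes).Pairwise pvLexLe := by
  unfold make_edges_alt
  rw [List.flatMap_def, List.pairwise_flatten]
  constructor
  · intro l hl
    rcases List.mem_map.1 hl with ⟨kv, _, rfl⟩
    rw [List.pairwise_map]
    exact (PySem.List.sorted_pairwise _ (fun p => p)).imp
      (fun hpq => Or.inr ⟨rfl, hpq⟩)
  · rw [List.pairwise_map]
    have hle : (PySem.List.sorted nodes (fun kv => kv.1)).Pairwise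
        (fun a b => a.1 ≤ b.1) := PySem.List.sorted_pairwise _ _
    have hnd : ((PySem.List.sorted nodes (fun kv => kv.1)).map Prod.fst).Nodup :=
      (((PySem.List.sorted_perm nodes (fun kv => kv.1) false).map Prod.fst).nodup_iff).2 h
    have hnd' : (PySem.List.sorted nodes (fun kv => kv.1)).Pairwise
        (fun a b => a.1 ≠ b.1) := by
      have := (List.pairwise_map.1 hnd)
      exact this.imp (fun hab => hab)
    have hlt : (PySem.List.sorted nodes (fun kv => kv.1)).Pairwise
        (fun a b => a.1 < b.1) :=
      (hle.and hnd').imp (fun hab => lt_of_le_of_ne hab.1 hab.2)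
    refine hlt.imp ?_
    intro kv kv' hkk' x hx y hy
    rcases List.mem_map.1 hx with ⟨p, _, rfl⟩
    rcases List.mem_map.1 hy with ⟨q, _, rfl⟩
    exact Or.inl hkk'

theorem pvLexLe_antisymm (a b : Int × Int) (h1 : pvLexLe a b) (h2 : pvLexLe b a) : a = b := by
  rcases a with ⟨a1, a2⟩; rcases b with ⟨b1, b2⟩
  simp only [pvLexLe] at h1 h2
  have : a1 = b1 ∧ a2 = b2 := by omega
  simp [this.1, this.2]

-- ===== VERDICT (by name: the statement is the Claim_ definition above) =====
theorem make_edges_spec : Claim_equal_make_edges := by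
  intro nodes _ hpre
  unfold Spec_make_edges
  have h : (nodes.map Prod.fst).Nodup := hpre
  have hA : make_edges nodes = PySem.List.sorted2 (pvEdges nodes) Prod.fst Prod.snd :=
    pv_make_edges_eq nodes h
  have hPA : (make_edges nodes).Pairwise pvLexLe := by
    rw [hA]; exact pv_sorted2_pairwise (pvEdges nodes)
  have hpermA : (make_edges nodes).Perm (pvEdges nodes) := by
    rw [hA]; exact PySem.List.sorted2_perm _ _ _ _
  have hperm : (make_edges nodes).Perm (make_edges_alt nodes) :=
    hpermA.trans (pv_make_edges_alt_perm nodes).symm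
  exact List.Perm.eq_of_pairwise
    (fun a b _ _ hab hba => pvLexLe_antisymm a b hab hba)
    hPA (pv_make_edges_alt_pairwise nodes h) hperm
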